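-- pv_equiv track=rewrite | github.com/jgunn25/pythonProject3 | cases.py | cases_by_gender
-- ===== SOURCE A (Python) =====
-- def cases_by_gender(dictionary): # organizes and counts individual cases based on gender
--     male = 0
--     female = 0
--     non_binary = 0
--     trans_man = 0
--     trans_woman = 0
--     unknown = 0
--     for key, value in dictionary.items(): #If statement cycles through all given genders to then categorize
--         for i in value:
--             if i[0] == "Male":
--                 male = male +1
--             elif i[0] == 'Female':
--                 female = female +1
--             elif i[0] == "Non-binary":
--                 non_binary = non_binary +1
--             elif i[0] == "Trans man":
--                 trans_man = trans_man +1
--             elif i[0] == "Trans woman":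
--                 trans_woman = trans_woman +1
--             else:
--                 unknown = unknown +1
--     return [male, female, non_binary, trans_man, trans_woman, unknown]
-- ===== SOURCE B (Python) =====
-- def cases_by_gender(dictionary):
--     # staged passes: flatten all gender strings once, then one counting pass per
--     # named category, and derive unknown as the remainder
--     heads = [i[0] for value in dictionary.values() for i in value]
--     named = [heads.count(g) for g in ("Male", "Female", "Non-binary", "Trans man", "Trans woman")]
--     return named + [len(heads) - sum(named)]
-- ===== Notes on version B (the rewrite author's own statement) =====
-- stated objective: idiomatic
-- what changed: Replaces A's single nested pass with six scalar if/elif accumulators by staged passes: flatten the gender strings once, run one list.count pass per named category, and derive unknown as total length minus the sum of the named counts.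
import Mathlib
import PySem

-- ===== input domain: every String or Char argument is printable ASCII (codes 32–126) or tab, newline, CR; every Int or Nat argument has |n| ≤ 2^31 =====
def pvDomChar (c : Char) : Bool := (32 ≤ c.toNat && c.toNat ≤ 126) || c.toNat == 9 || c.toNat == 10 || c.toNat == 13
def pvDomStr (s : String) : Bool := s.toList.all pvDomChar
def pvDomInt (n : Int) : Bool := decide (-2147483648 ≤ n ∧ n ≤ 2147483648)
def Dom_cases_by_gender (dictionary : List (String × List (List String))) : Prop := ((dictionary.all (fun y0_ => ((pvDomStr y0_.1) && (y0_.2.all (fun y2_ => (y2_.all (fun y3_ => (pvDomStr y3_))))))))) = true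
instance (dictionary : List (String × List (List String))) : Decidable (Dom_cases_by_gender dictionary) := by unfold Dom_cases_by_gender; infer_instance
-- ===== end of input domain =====

-- B replaces A's single dispatch pass over six scalar accumulators with staged passes:
-- flatten the gender strings once, count each named category with its own pass, and
-- derive unknown as total minus the named sum; objective: more idiomatic, same cost.

-- i[0]; Pre_ guarantees i is nonempty, so the getD default is never used
def pvHead (i : List String) : String := (PySem.List.pyGet? i 0).getD ""

-- ===== PORT A =====
def cases_by_gender (dictionary : List (String × List (List String))) : List Int :=
  let st := dictionary.foldl
    (fun (st : Int × Int × Int × Int × Int × Int) kv =>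
      kv.2.foldl (fun st i =>
        if pvHead i = "Male" then (st.1 + 1, st.2.1, st.2.2.1, st.2.2.2.1, st.2.2.2.2.1, st.2.2.2.2.2)
        else if pvHead i = "Female" then (st.1, st.2.1 + 1, st.2.2.1, st.2.2.2.1, st.2.2.2.2.1, st.2.2.2.2.2)
        else if pvHead i = "Non-binary" then (st.1, st.2.1, st.2.2.1 + 1, st.2.2.2.1, st.2.2.2.2.1, st.2.2.2.2.2)
        else if pvHead i = "Trans man" then (st.1, st.2.1, st.2.2.1, st.2.2.2.1 + 1, st.2.2.2.2.1, st.2.2.2.2.2)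
        else if pvHead i = "Trans woman" then (st.1, st.2.1, st.2.2.1, st.2.2.2.1, st.2.2.2.2.1 + 1, st.2.2.2.2.2)
        else (st.1, st.2.1, st.2.2.1, st.2.2.2.1, st.2.2.2.2.1, st.2.2.2.2.2 + 1)) st)
    (0, 0, 0, 0, 0, 0)
  [st.1, st.2.1, st.2.2.1, st.2.2.2.1, st.2.2.2.2.1, st.2.2.2.2.2]

-- ===== PORT B =====
def cases_by_gender_alt (dictionary : List (String × List (List String))) : List Int :=
  let heads := dictionary.flatMap (fun kv => kv.2.map pvHead)
  let named := ["Male", "Female", "Non-binary", "Trans man", "Trans woman"].map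
    (fun g => (PySem.List.count heads g : Int))
  named ++ [(heads.length : Int) - named.sum]

-- ===== PRECONDITION & SPEC =====
-- Pre_ excludes dictionaries containing an empty inner list, on which both Pythons raise IndexError at i[0].
def Pre_cases_by_gender (dictionary : List (String × List (List String))) : Prop :=
  (dictionary.all (fun kv => kv.2.all (fun i => !i.isEmpty))) = true
instance (dictionary : List (String × List (List String))) : Decidable (Pre_cases_by_gender dictionary) := by unfold Pre_cases_by_gender; infer_instance
def pvWitness_cases_by_gender : (List (String × List (List String))) :=
  [("a", [["Male"], ["odd"]]), ("b", [["Female"]])]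
def Spec_cases_by_gender (dictionary : List (String × List (List String))) (out : List Int) : Prop := out = cases_by_gender_alt dictionary
instance (dictionary : List (String × List (List String))) (out : List Int) : Decidable (Spec_cases_by_gender dictionary out) := by unfold Spec_cases_by_gender; infer_instance

-- ===== CLAIM (what is proved, stated in full; the proofs are below) =====
def Claim_equal_cases_by_gender : Prop := ∀ (dictionary : List (String × List (List String))), Dom_cases_by_gender dictionary → Pre_cases_by_gender dictionary → Spec_cases_by_gender dictionary (cases_by_gender dictionary)

-- ===== LEMMAS AND PROOFS =====

-- the gender strings of all records, in traversal order
def pvHeads (dictionary : List (String × List (List String))) : List String :=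
  dictionary.flatMap (fun kv => kv.2.map pvHead)

def pvOther (h : String) : Bool :=
  !(h == "Male" || h == "Female" || h == "Non-binary" || h == "Trans man" || h == "Trans woman")

theorem foldl_nested_heads {σ : Type} (f : σ → String → σ) (s : σ)
    (d : List (String × List (List String))) :
    d.foldl (fun s kv => kv.2.foldl (fun s i => f s (pvHead i)) s) s
      = (pvHeads d).foldl f s := by
  unfold pvHeads
  rw [List.foldl_flatMap]
  apply PySem.List.foldl_congr_mem
  intro acc kv _
  rw [List.foldl_map]

theorem stepA_components :
    (fun (st : Int × Int × Int × Int × Int × Int) (h : String) =>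
        if h = "Male" then (st.1 + 1, st.2.1, st.2.2.1, st.2.2.2.1, st.2.2.2.2.1, st.2.2.2.2.2)
        else if h = "Female" then (st.1, st.2.1 + 1, st.2.2.1, st.2.2.2.1, st.2.2.2.2.1, st.2.2.2.2.2)
        else if h = "Non-binary" then (st.1, st.2.1, st.2.2.1 + 1, st.2.2.2.1, st.2.2.2.2.1, st.2.2.2.2.2)
        else if h = "Trans man" then (st.1, st.2.1, st.2.2.1, st.2.2.2.1 + 1, st.2.2.2.2.1, st.2.2.2.2.2)
        else if h = "Trans woman" then (st.1, st.2.1, st.2.2.1, st.2.2.2.1, st.2.2.2.2.1 + 1, st.2.2.2.2.2)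
        else (st.1, st.2.1, st.2.2.1, st.2.2.2.1, st.2.2.2.2.1, st.2.2.2.2.2 + 1))
    = (fun st h =>
        (if h = "Male" then st.1 + 1 else st.1,
         if h = "Female" then st.2.1 + 1 else st.2.1,
         if h = "Non-binary" then st.2.2.1 + 1 else st.2.2.1,
         if h = "Trans man" then st.2.2.2.1 + 1 else st.2.2.2.1,
         if h = "Trans woman" then st.2.2.2.2.1 + 1 else st.2.2.2.2.1,
         if pvOther h then st.2.2.2.2.2 + 1 else st.2.2.2.2.2)) := by
  funext st h
  by_cases h1 : h = "Male" <;> by_cases h2 : h = "Female" <;> by_cases h3 : h = "Non-binary" <;>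
    by_cases h4 : h = "Trans man" <;> by_cases h5 : h = "Trans woman" <;>
    simp_all [pvOther]

theorem countP_split (hs : List String) :
    hs.countP (fun h => decide (h = "Male")) + hs.countP (fun h => decide (h = "Female"))
      + hs.countP (fun h => decide (h = "Non-binary")) + hs.countP (fun h => decide (h = "Trans man"))
      + hs.countP (fun h => decide (h = "Trans woman")) + hs.countP pvOther
      = hs.length := by
  induction hs with
  | nil => simp
  | cons h t ih =>
    simp only [List.countP_cons, List.length_cons]
    by_cases h1 : h = "Male" <;> by_cases h2 : h = "Female" <;> by_cases h3 : h = "Non-binary" <;>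
      by_cases h4 : h = "Trans man" <;> by_cases h5 : h = "Trans woman" <;>
      simp_all [pvOther] <;> omega

theorem countP_eq_count (hs : List String) (v : String) :
    hs.countP (fun h => decide (h = v)) = hs.count v := by
  refine List.countP_congr ?_
  intro a _
  simp

theorem stepA_eval (d : List (String × List (List String))) :
    cases_by_gender d =
      [((pvHeads d).count "Male" : Int), ((pvHeads d).count "Female" : Int),
       ((pvHeads d).count "Non-binary" : Int), ((pvHeads d).count "Trans man" : Int),
       ((pvHeads d).count "Trans woman" : Int), ((pvHeads d).countP pvOther : Int)] := by
  unfold cases_by_gender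
  rw [foldl_nested_heads
      (f := fun (st : Int × Int × Int × Int × Int × Int) h =>
        if h = "Male" then (st.1 + 1, st.2.1, st.2.2.1, st.2.2.2.1, st.2.2.2.2.1, st.2.2.2.2.2)
        else if h = "Female" then (st.1, st.2.1 + 1, st.2.2.1, st.2.2.2.1, st.2.2.2.2.1, st.2.2.2.2.2)
        else if h = "Non-binary" then (st.1, st.2.1, st.2.2.1 + 1, st.2.2.2.1, st.2.2.2.2.1, st.2.2.2.2.2)
        else if h = "Trans man" then (st.1, st.2.1, st.2.2.1, st.2.2.2.1 + 1, st.2.2.2.2.1, st.2.2.2.2.2)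
        else if h = "Trans woman" then (st.1, st.2.1, st.2.2.1, st.2.2.2.1, st.2.2.2.2.1 + 1, st.2.2.2.2.2)
        else (st.1, st.2.1, st.2.2.1, st.2.2.2.1, st.2.2.2.2.1, st.2.2.2.2.2 + 1)),
      stepA_components]
  rw [PySem.List.foldl_prod_mk
      (f := fun (a : Int) (h : String) => if h = "Male" then a + 1 else a)
      (g := fun (st : Int × Int × Int × Int × Int) (h : String) =>
        (if h = "Female" then st.1 + 1 else st.1,
         if h = "Non-binary" then st.2.1 + 1 else st.2.1,
         if h = "Trans man" then st.2.2.1 + 1 else st.2.2.1,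
         if h = "Trans woman" then st.2.2.2.1 + 1 else st.2.2.2.1,
         if pvOther h then st.2.2.2.2 + 1 else st.2.2.2.2))]
  rw [PySem.List.foldl_prod_mk
      (f := fun (a : Int) (h : String) => if h = "Female" then a + 1 else a)
      (g := fun (st : Int × Int × Int × Int) (h : String) =>
        (if h = "Non-binary" then st.1 + 1 else st.1,
         if h = "Trans man" then st.2.1 + 1 else st.2.1,
         if h = "Trans woman" then st.2.2.1 + 1 else st.2.2.1,
         if pvOther h then st.2.2.2 + 1 else st.2.2.2))]
  rw [PySem.List.foldl_prod_mk
      (f := fun (a : Int) (h : String) => if h = "Non-binary" then a + 1 else a)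
      (g := fun (st : Int × Int × Int) (h : String) =>
        (if h = "Trans man" then st.1 + 1 else st.1,
         if h = "Trans woman" then st.2.1 + 1 else st.2.1,
         if pvOther h then st.2.2 + 1 else st.2.2))]
  rw [PySem.List.foldl_prod_mk
      (f := fun (a : Int) (h : String) => if h = "Trans man" then a + 1 else a)
      (g := fun (st : Int × Int) (h : String) =>
        (if h = "Trans woman" then st.1 + 1 else st.1,
         if pvOther h then st.2 + 1 else st.2))]
  rw [PySem.List.foldl_prod_mk
      (f := fun (a : Int) (h : String) => if h = "Trans woman" then a + 1 else a)
      (g := fun (a : Int) (h : String) => if pvOther h then a + 1 else a)]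
  simp only [PySem.List.foldl_ite_add_one, countP_eq_count]
  simp

-- ===== VERDICT (by name: the statement is the Claim_ definition above) =====
theorem cases_by_gender_spec : Claim_equal_cases_by_gender := by
  intro d _ _
  unfold Spec_cases_by_gender
  rw [stepA_eval]
  unfold cases_by_gender_alt
  rw [show d.flatMap (fun kv => kv.2.map pvHead) = pvHeads d from rfl]
  have hsplit := countP_split (pvHeads d)
  simp only [countP_eq_count] at hsplit
  simp only [List.map_cons, List.map_nil, PySem.List.count_eq, List.cons_append,
    List.nil_append, List.sum_cons, List.sum_nil]
  refine List.ext_getElem (by simp) ?_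
  intro n h1 h2
  have hn : n < 6 := by simpa using h1
  interval_cases n <;> simp <;> omega
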